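-- pv_equiv track=rewrite | github.com/riffsircar/Zelda-Metroid-CVAE | generate-cvae.py | get_label_dg
-- ===== SOURCE A (Python) =====
-- def get_label_dg(room):
--     # {'#': 0, '*': 1, '-': 2, 'X': 3, '^': 4}
--     label = [False] * 4 # #, *, X, ^
--     room_string = ''
--     for l in room:
--         room_string += ''.join(l)
--     if '#' in room_string:
--         label[0] = True
--     if '*' in room_string:
--         label[1] = True
--     if 'X' in room_string:
--         label[2] = True
--     if '^' in room_string:
--         label[3] = True
--     return label
-- ===== SOURCE B (Python) =====
-- def get_label_dg(room):
--     idx = {'#': 0, '*': 1, 'X': 2, '^': 3}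
--     label = [False] * 4
--     for row in room:
--         for s in row:
--             for ch in s:
--                 i = idx.get(ch)
--                 if i is not None:
--                     label[i] = True
--     return label
-- ===== Notes on version B (the rewrite author's own statement) =====
-- stated objective: alternative
-- what changed: Instead of concatenating all rows into one big string and running four separate substring scans, B makes a single pass over the characters, setting flags through a char-to-index mapping, never materialising the concatenated string.
import Mathlib
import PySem

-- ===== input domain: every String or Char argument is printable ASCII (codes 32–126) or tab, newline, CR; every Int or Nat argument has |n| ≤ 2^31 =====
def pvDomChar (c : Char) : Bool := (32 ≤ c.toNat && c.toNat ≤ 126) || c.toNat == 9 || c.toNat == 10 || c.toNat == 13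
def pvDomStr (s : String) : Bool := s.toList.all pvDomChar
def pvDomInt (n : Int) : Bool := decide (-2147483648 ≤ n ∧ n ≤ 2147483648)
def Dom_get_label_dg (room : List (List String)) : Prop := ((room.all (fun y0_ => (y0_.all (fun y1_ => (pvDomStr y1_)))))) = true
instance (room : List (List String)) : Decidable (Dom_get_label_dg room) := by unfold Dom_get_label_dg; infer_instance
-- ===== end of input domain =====

-- B replaces A's concatenated room string and four substring scans by one pass over the
-- characters that sets flags through a char→index mapping (objective: alternative).

-- ===== PORT A =====
def get_label_dg (room : List (List String)) : List Bool :=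
  let label := [false, false, false, false]
  let room_string := room.foldl (fun s l => s ++ PySem.Str.join "" l) ""
  let label := if PySem.Str.isIn "#" room_string then label.set 0 true else label
  let label := if PySem.Str.isIn "*" room_string then label.set 1 true else label
  let label := if PySem.Str.isIn "X" room_string then label.set 2 true else label
  let label := if PySem.Str.isIn "^" room_string then label.set 3 true else label
  label

-- ===== PORT B =====
-- the dict {'#':0,'*':1,'X':2,'^':3}
def pvIdx : PySem.Dict Char Int := PySem.Dict.ofList [('#', (0 : Int)), ('*', (1 : Int)), ('X', (2 : Int)), ('^', (3 : Int))]

-- label[i] = True for the (always in-range, nonnegative) index produced by the dict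
def pvSetTrue (label : List Bool) (i : Int) : List Bool := label.set i.toNat true

def get_label_dg_alt (room : List (List String)) : List Bool :=
  room.foldl (fun label row =>
    row.foldl (fun label s =>
      s.toList.foldl (fun label ch =>
        match PySem.Dict.get? pvIdx ch with
        | some i => pvSetTrue label i
        | none => label) label) label) [false, false, false, false]

-- ===== PRECONDITION & SPEC =====
def Spec_get_label_dg (room : List (List String)) (out : List Bool) : Prop := out = get_label_dg_alt room
instance (room : List (List String)) (out : List Bool) : Decidable (Spec_get_label_dg room out) := by unfold Spec_get_label_dg; infer_instance

-- ===== CLAIM (what is proved, stated in full; the proofs are below) =====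
def Claim_equal_get_label_dg : Prop := ∀ (room : List (List String)), Dom_get_label_dg room → Spec_get_label_dg room (get_label_dg room)

-- ===== LEMMAS AND PROOFS =====

-- the characters of the whole room, in traversal order
def pvAllChars (room : List (List String)) : List Char :=
  (room.map (fun row => (row.map String.toList).flatten)).flatten

lemma pvJoin_empty_sep (xss : List (List Char)) : PySem.Chars.join [] xss = xss.flatten := by
  induction xss with
  | nil => rfl
  | cons x rest ih => cases rest <;> simp_all [PySem.Chars.join_cons_cons, PySem.Chars.join_singleton]

lemma pvRoomString_toList (room : List (List String)) (init : String) :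
    (room.foldl (fun s l => s ++ PySem.Str.join "" l) init).toList
      = init.toList ++ pvAllChars room := by
  induction room generalizing init with
  | nil => simp [pvAllChars]
  | cons row rest ih =>
      simp only [List.foldl_cons, ih, pvAllChars, List.map_cons, List.flatten_cons]
      simp [PySem.Str.toList_join, pvJoin_empty_sep]

lemma pvSingleton_isIn (c : Char) (sub s : String) (h : sub.toList = [c]) :
    PySem.Str.isIn sub s = s.toList.contains c := by
  rcases hc : s.toList.contains c with _ | _
  · rw [Bool.eq_false_iff, Ne, PySem.Str.isIn_iff_infix, h]
    intro hinf
    have : c ∈ s.toList := List.singleton_sublist.mp hinf.sublist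
    simp_all
  · rw [PySem.Str.isIn_iff_infix, h]
    have : c ∈ s.toList := by simp_all
    obtain ⟨l1, l2, hl⟩ := List.append_of_mem this
    exact ⟨l1, l2, by simp [hl]⟩

-- one character of B's inner loop, on a fully general 4-flag label
lemma pvB_chars (cs : List Char) (a b c d : Bool) :
    cs.foldl (fun label ch =>
        match PySem.Dict.get? pvIdx ch with
        | some i => pvSetTrue label i
        | none => label) [a, b, c, d]
      = [a || cs.contains '#', b || cs.contains '*', c || cs.contains 'X', d || cs.contains '^'] := by
  induction cs generalizing a b c d with
  | nil => simp
  | cons ch rest ih =>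
      simp only [List.foldl_cons]
      by_cases h1 : ch = '#'
      · subst h1
        rw [show PySem.Dict.get? pvIdx '#' = some 0 from by decide]
        simpa [pvSetTrue, Bool.or_assoc] using ih true b c d
      · by_cases h2 : ch = '*'
        · subst h2
          rw [show PySem.Dict.get? pvIdx '*' = some 1 from by decide]
          simpa [pvSetTrue, Bool.or_assoc] using ih a true c d
        · by_cases h3 : ch = 'X'
          · subst h3
            rw [show PySem.Dict.get? pvIdx 'X' = some 2 from by decide]
            simpa [pvSetTrue, Bool.or_assoc] using ih a b true d
          · by_cases h4 : ch = '^'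
            · subst h4
              rw [show PySem.Dict.get? pvIdx '^' = some 3 from by decide]
              simpa [pvSetTrue, Bool.or_assoc] using ih a b c true
            · have hnone : PySem.Dict.get? pvIdx ch = none := by
                rw [PySem.Dict.get?_eq_none_iff_not_mem_keys]
                have hk : pvIdx.keys = ['#', '*', 'X', '^'] := by decide
                simp [hk, h1, h2, h3, h4]
              simpa [hnone, List.contains_cons, Ne.symm h1, Ne.symm h2, Ne.symm h3, Ne.symm h4]
                using ih a b c d

lemma pvB_row (row : List String) (a b c d : Bool) :
    row.foldl (fun label s =>
      s.toList.foldl (fun label ch =>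
        match PySem.Dict.get? pvIdx ch with
        | some i => pvSetTrue label i
        | none => label) label) [a, b, c, d]
      = let cs := (row.map String.toList).flatten
        [a || cs.contains '#', b || cs.contains '*', c || cs.contains 'X', d || cs.contains '^'] := by
  induction row generalizing a b c d with
  | nil => simp
  | cons s rest ih =>
      simp only [List.foldl_cons, pvB_chars, ih, List.map_cons, List.flatten_cons,
        List.contains_append, Bool.or_assoc]

lemma pvB_eq (room : List (List String)) (a b c d : Bool) :
    room.foldl (fun label row =>
      row.foldl (fun label s =>
        s.toList.foldl (fun label ch =>
          match PySem.Dict.get? pvIdx ch with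
          | some i => pvSetTrue label i
          | none => label) label) label) [a, b, c, d]
      = let cs := pvAllChars room
        [a || cs.contains '#', b || cs.contains '*', c || cs.contains 'X', d || cs.contains '^'] := by
  induction room generalizing a b c d with
  | nil => simp [pvAllChars]
  | cons row rest ih =>
      simp only [List.foldl_cons, pvB_row, ih, pvAllChars, List.map_cons, List.flatten_cons,
        List.contains_append, Bool.or_assoc]

-- ===== VERDICT (by name: the statement is the Claim_ definition above) =====
theorem get_label_dg_spec : Claim_equal_get_label_dg := by
  intro room _
  unfold Spec_get_label_dg get_label_dg get_label_dg_alt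
  rw [pvB_eq]
  have hrs := pvRoomString_toList room ""
  simp only [String.toList_empty, List.nil_append] at hrs
  have h1 := pvSingleton_isIn '#' "#" (room.foldl (fun s l => s ++ PySem.Str.join "" l) "") rfl
  have h2 := pvSingleton_isIn '*' "*" (room.foldl (fun s l => s ++ PySem.Str.join "" l) "") rfl
  have h3 := pvSingleton_isIn 'X' "X" (room.foldl (fun s l => s ++ PySem.Str.join "" l) "") rfl
  have h4 := pvSingleton_isIn '^' "^" (room.foldl (fun s l => s ++ PySem.Str.join "" l) "") rfl
  rw [hrs] at h1 h2 h3 h4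
  simp only [h1, h2, h3, h4]
  rcases (pvAllChars room).contains '#' <;> rcases (pvAllChars room).contains '*' <;>
    rcases (pvAllChars room).contains 'X' <;> rcases (pvAllChars room).contains '^' <;> simp
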